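-- pv_equiv track=rewrite | github.com/Sh3mm/truth-tables | possibility gen.py | grayToKarnaugh
-- ===== SOURCE A (Python) =====
-- def grayToKarnaugh(grayTable, nbOfVariable):
--     """turns a gray Truth table into a karnaugh table
--     accepts a gray table and a number of variable to return a karnaugh table"""
--     nbposPerLine = 2**(int(nbOfVariable/2)+ nbOfVariable%2)
--     nbLines = 2**int(nbOfVariable/2)
--
--     karnaugh = [ [0]*nbposPerLine for _ in range(nbLines)]
--
--     for i in range(nbLines):
--         for j in range(nbposPerLine):
--             karnaugh[i][j] = grayTable[i*nbposPerLine + j][nbOfVariable]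
--     return karnaughCorrected(karnaugh,nbLines)
--
-- def karnaughCorrected(rawKarnaughTable, nbOfLines):
--     """corrects the raw Karnaugh Table
--     accepts a raw Karnaugh Table and a nb of lines to return a corrected Karnaugh Table"""
--     cTableKarnaugh = rawKarnaughTable[:]
--     for i in range(nbOfLines):
--         if i%2 == 1:
--             cTableKarnaugh[i] = rawKarnaughTable[i][::-1]
--     return cTableKarnaugh
-- ===== SOURCE B (Python) =====
-- def grayToKarnaugh(grayTable, nbOfVariable):
--     """turns a gray Truth table into a karnaugh table.
--     Different strategy: extract the output column sequentially, then cut it into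
--     boustrophedon rows: consume the flat column chunk by chunk with a direction
--     flag that flips each row, instead of filling a 2D table by index arithmetic
--     and reversing odd rows afterwards."""
--     nbposPerLine = 2**(int(nbOfVariable/2) + nbOfVariable % 2)
--     nbLines = 2**int(nbOfVariable/2)
--     col = [row[nbOfVariable] for row in grayTable[:nbLines*nbposPerLine]]
--     karnaugh = []
--     forward = True
--     while col:
--         chunk, col = col[:nbposPerLine], col[nbposPerLine:]
--         karnaugh.append(chunk if forward else chunk[::-1])
--         forward = not forward
--     return karnaugh
-- ===== Notes on version B (the rewrite author's own statement) =====
-- stated objective: alternative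
-- what changed: B extracts the output column sequentially (one list of values) and then cuts it into boustrophedon rows by consuming it chunk by chunk with a flipping direction flag, instead of A's allocate-a-zero-matrix, fill-by-index-arithmetic (grayTable[i*npl+j]) and a separate odd-row-reversal correction function.
import Mathlib
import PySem

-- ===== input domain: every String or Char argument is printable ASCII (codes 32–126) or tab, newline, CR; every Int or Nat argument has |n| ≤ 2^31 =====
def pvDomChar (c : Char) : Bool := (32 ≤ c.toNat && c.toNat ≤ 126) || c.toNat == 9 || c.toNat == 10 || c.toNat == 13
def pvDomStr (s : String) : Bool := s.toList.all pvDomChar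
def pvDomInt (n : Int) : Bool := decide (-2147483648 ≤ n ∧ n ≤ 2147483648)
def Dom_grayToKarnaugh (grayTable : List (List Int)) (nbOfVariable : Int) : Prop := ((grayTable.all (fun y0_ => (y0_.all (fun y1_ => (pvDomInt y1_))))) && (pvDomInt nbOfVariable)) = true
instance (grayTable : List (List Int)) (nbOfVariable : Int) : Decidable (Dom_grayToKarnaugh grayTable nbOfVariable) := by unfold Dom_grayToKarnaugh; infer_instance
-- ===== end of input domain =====

-- B replaces A's three phases (zero matrix, fill by index arithmetic, reverse odd rows in a
-- separate correction function) by sequential column extraction followed by a boustrophedon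
-- chunking loop with a direction flag; objective: alternative (same cost, different traversal).

-- ===== PORT A =====
-- grayTable[idx][nbOfVariable], the cell fetch of A's fill loop.
-- Out-of-range indices raise IndexError in Python (excluded by Pre_); the .getD default is never
-- reached inside Pre_.
def pvCell (grayTable : List (List Int)) (nbOfVariable : Int) (npl i j : Nat) : Int :=
  (PySem.List.pyGet? ((PySem.List.pyGet? grayTable ((i * npl + j : Nat) : Int)).getD [])
      nbOfVariable).getD 0

-- helper of A: copies the table and reverses the odd rows (reading from the raw table)
def karnaughCorrected (rawKarnaughTable : List (List Int)) (nbOfLines : Nat) : List (List Int) :=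
  (List.range nbOfLines).foldl
    (fun t i => if i % 2 = 1 then t.set i ((rawKarnaughTable.getD i []).reverse) else t)
    rawKarnaughTable

-- A: build the zero matrix, fill it cell by cell (karnaugh[i][j] = …), then correct.
-- int(nbOfVariable/2) truncates toward zero = Int.tdiv (exact: |nbOfVariable| ≤ 2^31 < 2^53, so the
-- float nbOfVariable/2 is exact); exponents taken in Nat via toNat (exact whenever they are ≥ 0,
-- i.e. on Pre_; elsewhere Python raises).
def grayToKarnaugh (grayTable : List (List Int)) (nbOfVariable : Int) : List (List Int) :=
  let npl : Nat := 2 ^ (Int.tdiv nbOfVariable 2 + PySem.Int.mod nbOfVariable 2).toNat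
  let nbLines : Nat := 2 ^ (Int.tdiv nbOfVariable 2).toNat
  let karnaugh : List (List Int) := List.replicate nbLines (List.replicate npl 0)
  let filled : List (List Int) :=
    (List.range nbLines).foldl (fun t i =>
      (List.range npl).foldl (fun t j =>
        t.modify i (fun row => row.set j (pvCell grayTable nbOfVariable npl i j))) t) karnaugh
  karnaughCorrected filled nbLines

-- ===== PORT B =====
-- B's while loop: consume the flat output column chunk by chunk (chunk = col[:npl],
-- col = col[npl:]), appending the chunk forwards or reversed according to the flipping flag.
-- The chunk width npl = 2^… ≥ 1 is passed as m+1 (m = npl-1) so the recursion on the shrinking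
-- column is structurally decreasing, exactly as the Python loop terminates because npl ≥ 1.
def pvChunks (m : Nat) : Bool → List Int → List (List Int)
  | _, [] => []
  | forward, c :: cs =>
      (if forward then (c :: cs).take (m + 1) else ((c :: cs).take (m + 1)).reverse)
        :: pvChunks m (!forward) ((c :: cs).drop (m + 1))
  termination_by _ col => col.length
  decreasing_by simp

-- B: col = [row[nbOfVariable] for row in grayTable[:nbLines*npl]], then the chunking loop.
def grayToKarnaugh_alt (grayTable : List (List Int)) (nbOfVariable : Int) : List (List Int) :=
  let npl : Nat := 2 ^ (Int.tdiv nbOfVariable 2 + PySem.Int.mod nbOfVariable 2).toNat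
  let nbLines : Nat := 2 ^ (Int.tdiv nbOfVariable 2).toNat
  let col : List Int :=
    (PySem.List.slice grayTable none (some ((nbLines * npl : Nat) : Int))).map
      (fun row => (PySem.List.pyGet? row nbOfVariable).getD 0)
  pvChunks (npl - 1) true col

-- ===== PRECONDITION & SPEC =====
-- Pre_ = exactly the inputs on which A returns: nbOfVariable ≥ -1 (for nbOfVariable ≤ -2 the
-- sizes 2**… are non-integer floats and A raises TypeError), the table holds at least
-- 2^m rows, where m = nbOfVariable for nbOfVariable ≥ 0 and m = 1 for nbOfVariable = -1
-- (the total cell count; m ≤ log2 length ⇔ 2^m ≤ length), and every used row is long enough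
-- for row[nbOfVariable] (nonempty when nbOfVariable = -1, which indexes from the end);
-- otherwise Python raises IndexError.
def Pre_grayToKarnaugh (grayTable : List (List Int)) (nbOfVariable : Int) : Prop :=
  -1 ≤ nbOfVariable ∧ grayTable ≠ [] ∧
    (if 0 ≤ nbOfVariable then nbOfVariable.toNat else 1) ≤ Nat.log2 grayTable.length ∧
    ∀ row ∈ grayTable.take (2 ^ (if 0 ≤ nbOfVariable then nbOfVariable.toNat else 1)),
      (if 0 ≤ nbOfVariable then nbOfVariable < (row.length : Int) else 1 ≤ row.length)
instance (grayTable : List (List Int)) (nbOfVariable : Int) : Decidable (Pre_grayToKarnaugh grayTable nbOfVariable) := by unfold Pre_grayToKarnaugh; infer_instance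

def pvWitness_grayToKarnaugh : List (List Int) × Int := ([[0, 5], [0, 7]], 1)

def Spec_grayToKarnaugh (grayTable : List (List Int)) (nbOfVariable : Int) (out : List (List Int)) : Prop := out = grayToKarnaugh_alt grayTable nbOfVariable
instance (grayTable : List (List Int)) (nbOfVariable : Int) (out : List (List Int)) : Decidable (Spec_grayToKarnaugh grayTable nbOfVariable out) := by unfold Spec_grayToKarnaugh; infer_instance

-- ===== CLAIM (what is proved, stated in full; the proofs are below) =====
def Claim_equal_grayToKarnaugh : Prop := ∀ (grayTable : List (List Int)) (nbOfVariable : Int), Dom_grayToKarnaugh grayTable nbOfVariable → Pre_grayToKarnaugh grayTable nbOfVariable → Spec_grayToKarnaugh grayTable nbOfVariable (grayToKarnaugh grayTable nbOfVariable)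

-- ===== LEMMAS AND PROOFS =====

-- ---- A-side: the three phases reduce to a map with odd rows reversed ----

-- fill loop over one row: length is preserved
theorem pv_fold_set_length {α : Type} (f : Nat → α) :
    ∀ (n : Nat) (l : List α),
      ((List.range n).foldl (fun r j => r.set j (f j)) l).length = l.length := by
  intro n
  induction n with
  | zero => intro l; simp
  | succ n ih => intro l; simp [List.range_succ, List.foldl_append, ih]

-- fill loop over one row: pointwise value
theorem pv_fold_set_getElem? {α : Type} (f : Nat → α) :
    ∀ (n : Nat) (l : List α) (k : Nat),
      ((List.range n).foldl (fun r j => r.set j (f j)) l)[k]? =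
        if k < n ∧ k < l.length then some (f k) else l[k]? := by
  intro n
  induction n with
  | zero => intro l k; simp
  | succ n ih =>
      intro l k
      rw [List.range_succ, List.foldl_append]
      simp only [List.foldl_cons, List.foldl_nil]
      rw [List.getElem?_set, pv_fold_set_length, ih]
      by_cases hk : n = k
      · subst hk
        rw [if_pos rfl]
        by_cases hl : n < l.length
        · rw [if_pos hl, if_pos ⟨Nat.lt_succ_self n, hl⟩]
        · have h0 : l[n]? = none := by rw [List.getElem?_eq_none]; omega
          rw [if_neg hl, if_neg (by intro h; exact hl h.2), h0]
      · rw [if_neg hk]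
        by_cases h1 : k < n ∧ k < l.length
        · rw [if_pos h1, if_pos ⟨by omega, h1.2⟩]
        · rw [if_neg h1, if_neg (by intro h; exact h1 ⟨by omega, h.2⟩)]

-- a full fill of a row of the right length is a map
theorem pv_fill_row {α : Type} (f : Nat → α) (n : Nat) (l : List α) (h : l.length = n) :
    (List.range n).foldl (fun r j => r.set j (f j)) l = (List.range n).map f := by
  apply List.ext_getElem?
  intro k
  rw [pv_fold_set_getElem?, h]
  by_cases hk : k < n
  · simp [hk]
  · have h1 : l[k]? = none := by rw [List.getElem?_eq_none]; omega
    simp [hk, h1]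

-- a fold of modifications at one fixed index is one modification
theorem pv_foldl_modify {α : Type} (i : Nat) (g : Nat → α → α) :
    ∀ (l : List Nat) (t : List α),
      l.foldl (fun t j => t.modify i (g j)) t =
        t.modify i (fun x => l.foldl (fun x j => g j x) x) := by
  intro l
  induction l with
  | nil => intro t; exact (List.modify_id i t).symm
  | cons a l ih =>
      intro t
      simp only [List.foldl_cons]
      rw [ih]
      apply List.ext_getElem?
      intro k
      simp only [List.getElem?_modify]
      by_cases hk : i = k
      · cases t[k]? <;> simp [hk]
      · cases t[k]? <;> simp [hk]

-- outer loop: modifications at the distinct indices 0..n-1, pointwise value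
theorem pv_outer_getElem? {α : Type} (F : Nat → α → α) :
    ∀ (n : Nat) (t : List α) (k : Nat),
      ((List.range n).foldl (fun t i => t.modify i (F i)) t)[k]? =
        if k < n then (t[k]?).map (F k) else t[k]? := by
  intro n
  induction n with
  | zero => intro t k; simp
  | succ n ih =>
      intro t k
      rw [List.range_succ, List.foldl_append]
      simp only [List.foldl_cons, List.foldl_nil]
      rw [List.getElem?_modify, ih]
      by_cases hk : n = k
      · subst hk; simp
      · by_cases h1 : k < n
        · simp [hk, h1]; omega
        · have h2 : ¬ k < n + 1 := by omega
          simp [hk, h1, h2]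

-- correction loop: pointwise value
theorem pv_corr_getElem? (raw : List (List Int)) :
    ∀ (n : Nat) (t : List (List Int)) (k : Nat),
      ((List.range n).foldl
          (fun t i => if i % 2 = 1 then t.set i ((raw.getD i []).reverse) else t) t)[k]? =
        if k < n ∧ k % 2 = 1 ∧ k < t.length then some ((raw.getD k []).reverse) else t[k]? := by
  have hlen : ∀ (n : Nat) (t : List (List Int)),
      ((List.range n).foldl
          (fun t i => if i % 2 = 1 then t.set i ((raw.getD i []).reverse) else t) t).length =
        t.length := by
    intro n
    induction n with
    | zero => intro t; rfl
    | succ n ih =>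
        intro t
        rw [List.range_succ, List.foldl_append]
        simp only [List.foldl_cons, List.foldl_nil]
        split
        · rw [List.length_set, ih]
        · rw [ih]
  intro n
  induction n with
  | zero => intro t k; simp
  | succ n ih =>
      intro t k
      rw [List.range_succ, List.foldl_append]
      simp only [List.foldl_cons, List.foldl_nil]
      by_cases hp : n % 2 = 1
      · rw [if_pos hp, List.getElem?_set, hlen n t, ih]
        by_cases hk : n = k
        · subst hk
          rw [if_pos rfl]
          by_cases hl : n < t.length
          · rw [if_pos hl, if_pos ⟨Nat.lt_succ_self n, hp, hl⟩]
          · have h0 : t[n]? = none := by rw [List.getElem?_eq_none]; omega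
            rw [if_neg hl, if_neg (fun h => hl h.2.2)]
            exact h0.symm
        · rw [if_neg hk]
          by_cases h1 : k < n ∧ k % 2 = 1 ∧ k < t.length
          · rw [if_pos h1, if_pos ⟨by omega, h1.2⟩]
          · rw [if_neg h1, if_neg (fun h => h1 ⟨by omega, h.2⟩)]
      · rw [if_neg hp, ih]
        by_cases h1 : k < n ∧ k % 2 = 1 ∧ k < t.length
        · rw [if_pos h1, if_pos ⟨by omega, h1.2⟩]
        · rw [if_neg h1, if_neg (by
            intro h
            apply h1
            refine ⟨?_, h.2⟩
            by_cases he : k = n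
            · exact absurd (he ▸ h.2.1) hp
            · omega)]

-- the filled raw table is exactly the row-by-row map
theorem pv_filled_eq (grayTable : List (List Int)) (nbOfVariable : Int) (npl nbLines : Nat) :
    ((List.range nbLines).foldl (fun t i =>
        (List.range npl).foldl (fun t j =>
          t.modify i (fun row => row.set j (pvCell grayTable nbOfVariable npl i j))) t)
      (List.replicate nbLines (List.replicate npl (0 : Int)))) =
      (List.range nbLines).map (fun i =>
        (List.range npl).map (fun j => pvCell grayTable nbOfVariable npl i j)) := by
  have hstep : (fun (t : List (List Int)) (i : Nat) =>
      (List.range npl).foldl (fun t j =>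
        t.modify i (fun row => row.set j (pvCell grayTable nbOfVariable npl i j))) t) =
      (fun t i => t.modify i (fun row =>
        (List.range npl).foldl
          (fun row j => row.set j (pvCell grayTable nbOfVariable npl i j)) row)) := by
    funext t i
    exact pv_foldl_modify i (fun j row => row.set j (pvCell grayTable nbOfVariable npl i j)) _ t
  rw [hstep]
  apply List.ext_getElem?
  intro k
  rw [pv_outer_getElem?]
  by_cases hk : k < nbLines
  · rw [List.getElem?_map, List.getElem?_range hk]
    simp only [hk, if_true, List.getElem?_replicate, Option.map_some]
    rw [pv_fill_row _ _ _ (by simp)]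
  · simp [hk]

-- A in normal form: rows mapped over the line range, odd rows reversed
theorem pv_A_norm (grayTable : List (List Int)) (nbOfVariable : Int) :
    grayToKarnaugh grayTable nbOfVariable =
      (List.range (2 ^ (Int.tdiv nbOfVariable 2).toNat)).map (fun i =>
        if i % 2 = 1 then
          ((List.range (2 ^ (Int.tdiv nbOfVariable 2 + PySem.Int.mod nbOfVariable 2).toNat)).map
            (fun j => pvCell grayTable nbOfVariable
              (2 ^ (Int.tdiv nbOfVariable 2 + PySem.Int.mod nbOfVariable 2).toNat) i j)).reverse
        else
          (List.range (2 ^ (Int.tdiv nbOfVariable 2 + PySem.Int.mod nbOfVariable 2).toNat)).map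
            (fun j => pvCell grayTable nbOfVariable
              (2 ^ (Int.tdiv nbOfVariable 2 + PySem.Int.mod nbOfVariable 2).toNat) i j)) := by
  unfold grayToKarnaugh karnaughCorrected
  simp only []
  set npl : Nat := 2 ^ (Int.tdiv nbOfVariable 2 + PySem.Int.mod nbOfVariable 2).toNat with hnpl
  set nbLines : Nat := 2 ^ (Int.tdiv nbOfVariable 2).toNat with hnb
  rw [pv_filled_eq]
  set rowMap : Nat → List Int :=
    (fun i => (List.range npl).map (fun j => pvCell grayTable nbOfVariable npl i j)) with hrow
  apply List.ext_getElem?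
  intro k
  rw [pv_corr_getElem?]
  by_cases hk : k < nbLines
  · have hmapk : ((List.range nbLines).map rowMap)[k]? = some (rowMap k) := by
      rw [List.getElem?_map, List.getElem?_range hk]; rfl
    have hgetD : ((List.range nbLines).map rowMap).getD k [] = rowMap k := by
      unfold List.getD; rw [hmapk]; rfl
    have hlen : k < ((List.range nbLines).map rowMap).length := by simp [hk]
    have hR : ((List.range nbLines).map (fun i =>
        if i % 2 = 1 then (rowMap i).reverse else rowMap i))[k]? =
        some (if k % 2 = 1 then (rowMap k).reverse else rowMap k) := by
      rw [List.getElem?_map, List.getElem?_range hk]; rfl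
    rw [hR]
    by_cases hp : k % 2 = 1
    · rw [if_pos ⟨hk, hp, hlen⟩, hgetD, if_pos hp]
    · rw [if_neg (fun h => hp h.2.1), hmapk, if_neg hp]
  · have h1 : ((List.range nbLines).map rowMap)[k]? = none := by
      rw [List.getElem?_eq_none]; simp; omega
    have h2 : ((List.range nbLines).map (fun i =>
        if i % 2 = 1 then (rowMap i).reverse else rowMap i))[k]? = none := by
      rw [List.getElem?_eq_none]; simp; omega
    rw [if_neg (fun h => hk h.1), h1, h2]

-- ---- B-side: the chunking loop on a column of L·npl values is the same map ----

-- one step of the chunking loop on a column that starts with a full row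
theorem pv_chunks_step (m : Nat) (fwd : Bool) (xs ys : List Int) (hx : xs.length = m + 1) :
    pvChunks m fwd (xs ++ ys) =
      (if fwd then xs else xs.reverse) :: pvChunks m (!fwd) ys := by
  cases xs with
  | nil => simp at hx
  | cons c cs =>
      rw [List.cons_append]
      simp only [pvChunks]
      have ht : ((c :: cs) ++ ys).take (m + 1) = c :: cs := by
        rw [← hx]; exact List.take_left
      have hd : ((c :: cs) ++ ys).drop (m + 1) = ys := by
        rw [← hx]; exact List.drop_left
      rw [List.cons_append] at ht hd
      rw [ht, hd]

-- the chunking loop run over L rows' worth of values, with the flag tracking the row parity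
theorem pv_chunks_rows (m : Nat) (g : Nat → Int) :
    ∀ (L i : Nat),
      pvChunks m (decide (i % 2 = 0)) ((List.range' (i * (m + 1)) (L * (m + 1))).map g) =
        (List.range' i L).map (fun t =>
          if t % 2 = 1 then ((List.range (m + 1)).map (fun j => g (t * (m + 1) + j))).reverse
          else (List.range (m + 1)).map (fun j => g (t * (m + 1) + j))) := by
  intro L
  induction L with
  | zero => intro i; rw [Nat.zero_mul]; simp only [List.map_nil, List.range'_zero, pvChunks]
  | succ L ih =>
      intro i
      have hsplit : List.range' (i * (m + 1)) ((L + 1) * (m + 1)) =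
          List.range' (i * (m + 1)) (m + 1) ++ List.range' ((i + 1) * (m + 1)) (L * (m + 1)) := by
        rw [show (i + 1) * (m + 1) = i * (m + 1) + (m + 1) by ring, List.range'_append_1]
        ring_nf
      rw [hsplit, List.map_append]
      have hrow : (List.range' (i * (m + 1)) (m + 1)).map g =
          (List.range (m + 1)).map (fun j => g (i * (m + 1) + j)) := by
        rw [List.range'_eq_map_range, List.map_map]; rfl
      rw [pv_chunks_step m _ _ _ (by simp [hrow])]
      have hflag : (!decide (i % 2 = 0)) = decide ((i + 1) % 2 = 0) := by
        rcases Nat.mod_two_eq_zero_or_one i with h | h <;> simp [h, Nat.add_mod]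
      rw [hrow, hflag, ih (i + 1), List.range'_succ, List.map_cons]
      congr 1
      rcases Nat.mod_two_eq_zero_or_one i with h | h <;> simp [h]

-- the extracted column is the cell sequence, given the table is long enough
theorem pv_col_eq (grayTable : List (List Int)) (nbOfVariable : Int) (N : Nat)
    (hN : N ≤ grayTable.length) :
    (grayTable.take N).map (fun row => (PySem.List.pyGet? row nbOfVariable).getD 0) =
      (List.range N).map
        (fun k => (PySem.List.pyGet? (grayTable.getD k []) nbOfVariable).getD 0) := by
  apply List.ext_getElem
  · simp; omega
  · intro k h1 h2
    simp only [List.length_map, List.length_take] at h1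
    rw [List.getElem_map, List.getElem_map, List.getElem_range, List.getElem_take]
    congr 1
    rw [List.getD_eq_getElem?_getD, List.getElem?_eq_getElem (by omega)]
    rfl

-- A's cell fetch is the column function at the flat index
theorem pv_cell_eq_g (grayTable : List (List Int)) (nbOfVariable : Int) (npl i j : Nat) :
    pvCell grayTable nbOfVariable npl i j =
      (PySem.List.pyGet? (grayTable.getD (i * npl + j) []) nbOfVariable).getD 0 := by
  unfold pvCell
  rw [PySem.List.pyGet?_natCast, List.getD_eq_getElem?_getD]

-- the Karnaugh dimensions multiply to the row count Pre_ guarantees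
theorem pv_dims_mul (nbOfVariable : Int) (h : -1 ≤ nbOfVariable) :
    2 ^ (Int.tdiv nbOfVariable 2).toNat *
        2 ^ (Int.tdiv nbOfVariable 2 + PySem.Int.mod nbOfVariable 2).toNat =
      2 ^ (if 0 ≤ nbOfVariable then nbOfVariable.toNat else 1) := by
  by_cases hn : 0 ≤ nbOfVariable
  · rw [if_pos hn, ← pow_add]
    congr 1
    rw [Int.tdiv_eq_ediv_of_nonneg hn, PySem.Int.mod_eq_emod_of_pos (by norm_num)]
    omega
  · have hm1 : nbOfVariable = -1 := by omega
    subst hm1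
    rw [if_neg hn]
    decide

-- ===== VERDICT (by name: the statement is the Claim_ definition above) =====
theorem grayToKarnaugh_spec : Claim_equal_grayToKarnaugh := by
  intro grayTable nbOfVariable _ hpre
  obtain ⟨h1, h2, h3, _⟩ := hpre
  unfold Spec_grayToKarnaugh grayToKarnaugh_alt
  simp only []
  set npl : Nat := 2 ^ (Int.tdiv nbOfVariable 2 + PySem.Int.mod nbOfVariable 2).toNat with hnpl
  set nbLines : Nat := 2 ^ (Int.tdiv nbOfVariable 2).toNat with hnb
  -- the table is long enough: Pre_'s log2 bound gives 2^m ≤ length = nbLines * npl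
  have hNle : nbLines * npl ≤ grayTable.length := by
    rw [hnb, hnpl, pv_dims_mul nbOfVariable h1]
    calc 2 ^ (if 0 ≤ nbOfVariable then nbOfVariable.toNat else 1)
        ≤ 2 ^ (Nat.log2 grayTable.length) := Nat.pow_le_pow_right (by norm_num) h3
      _ ≤ grayTable.length := Nat.log2_self_le (by
          intro h0; exact h2 (List.length_eq_zero_iff.mp h0))
  -- B's slice is a take, the column is the cell sequence
  rw [PySem.List.slice_to_natCast, pv_col_eq grayTable nbOfVariable _ hNle]
  -- npl = 2^… ≥ 1, so (npl - 1) + 1 = npl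
  have hm : npl - 1 + 1 = npl := by
    have : 0 < npl := by rw [hnpl]; positivity
    omega
  have hcol : (List.range (nbLines * npl)).map
      (fun k => (PySem.List.pyGet? (grayTable.getD k []) nbOfVariable).getD 0) =
      (List.range' (0 * (npl - 1 + 1)) (nbLines * (npl - 1 + 1))).map
        (fun k => (PySem.List.pyGet? (grayTable.getD k []) nbOfVariable).getD 0) := by
    rw [hm, Nat.zero_mul, List.range_eq_range']
  rw [hcol]
  have := pv_chunks_rows (npl - 1)
    (fun k => (PySem.List.pyGet? (grayTable.getD k []) nbOfVariable).getD 0) nbLines 0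
  rw [show (decide (0 % 2 = 0)) = true by decide] at this
  rw [this, hm]
  rw [pv_A_norm grayTable nbOfVariable, ← hnb, ← hnpl, ← List.range_eq_range']
  apply List.map_congr_left
  intro t _
  simp only [pv_cell_eq_g]
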